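-- pv_equiv track=rewrite | github.com/ErfanShahbazzadeh/Compiler | Lexical Analysis/Lexical Analysis.py | loop_checker
-- ===== SOURCE A (Python) =====
-- def loop_checker(lexeme):
--     state = 1
--     flag = False
--     for ch in lexeme:
--         match state:
--             case 1:
--                 if ch == "l":
--                     state = 2
--                 else:
--                     return False
--             case 2:
--                 if ch == "o":
--                     state = 3
--                 else:
--                     return False
--             case 3:
--                 if ch == "o":
--                     state = 4
--                 else:
--                     return False
--             case 4:
--                 if ch == "p":
--                     flag = True
--                     state = 5
--                 else:
--                     return False
--             case 5:
--                 if 'a' <= ch <= 'z' or 'A' <= ch <= 'Z' or ch == "_" or "0" <= ch <= "9":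
--                     return False
--     if flag:
--         return True
-- ===== SOURCE B (Python) =====
-- def loop_checker(lexeme):
--     if not lexeme.startswith("loop"):
--         return False
--     for ch in lexeme[4:]:
--         if 'a' <= ch <= 'z' or 'A' <= ch <= 'Z' or ch == '_' or '0' <= ch <= '9':
--             return False
--     return True
-- ===== Notes on version B (the rewrite author's own statement) =====
-- stated objective: simpler
-- what changed: Replaces the explicit DFA state machine with a startswith("loop") prefix test followed by a scan of the tail rejecting ASCII identifier characters; Pre_ excludes the proper prefixes of "loop" ("", "l", "lo", "loo"), on which A falls off its loop with the flag unset and returns None rather than a bool, while B returns False.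
-- outside the precondition, e.g. on loop_checker('lo'): A returns None, B returns False; on loop_checker('loo'): A returns None, B returns False
import Mathlib
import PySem

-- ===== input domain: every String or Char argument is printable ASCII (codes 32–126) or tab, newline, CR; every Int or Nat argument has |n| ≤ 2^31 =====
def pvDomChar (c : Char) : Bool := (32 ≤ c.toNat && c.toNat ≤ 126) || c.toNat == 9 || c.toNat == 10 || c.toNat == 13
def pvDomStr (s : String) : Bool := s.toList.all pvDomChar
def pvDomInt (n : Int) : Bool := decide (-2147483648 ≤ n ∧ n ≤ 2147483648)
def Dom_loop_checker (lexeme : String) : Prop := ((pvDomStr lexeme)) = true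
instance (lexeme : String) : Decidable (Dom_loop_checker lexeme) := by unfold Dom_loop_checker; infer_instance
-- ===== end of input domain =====

-- B replaces A's explicit DFA state machine with a startswith("loop") test plus a tail scan
-- (objective: simpler); equivalence on Pre_, which excludes the proper prefixes of "loop".


-- ===== PORT A =====
-- A's loop over the characters, carrying the DFA state and the flag; the implicit
-- 'return None' at the end is the 'none' in the base case.
def loopCheckerA : List Char → Nat → Bool → Option Bool
  | [], _, flag => if flag then some true else none
  | ch :: rest, state, flag =>
    match state with
    | 1 => if ch = 'l' then loopCheckerA rest 2 flag else some false
    | 2 => if ch = 'o' then loopCheckerA rest 3 flag else some false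
    | 3 => if ch = 'o' then loopCheckerA rest 4 flag else some false
    | 4 => if ch = 'p' then loopCheckerA rest 5 true else some false
    | 5 => if ('a' ≤ ch ∧ ch ≤ 'z') ∨ ('A' ≤ ch ∧ ch ≤ 'Z') ∨ ch = '_' ∨ ('0' ≤ ch ∧ ch ≤ '9')
           then some false else loopCheckerA rest 5 flag
    | _ => loopCheckerA rest state flag  -- no case of the match fires: the loop just continues (unreachable)

def loop_checker (lexeme : String) : Option Bool := loopCheckerA lexeme.toList 1 false

-- ===== PORT B =====
def isIdentChar (ch : Char) : Bool :=
  ('a' ≤ ch ∧ ch ≤ 'z') ∨ ('A' ≤ ch ∧ ch ≤ 'Z') ∨ ch = '_' ∨ ('0' ≤ ch ∧ ch ≤ '9')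

-- B's loop: 'for ch in lexeme[4:]'
def loopCheckerTail : List Char → Option Bool
  | [] => some true
  | ch :: rest => if isIdentChar ch then some false else loopCheckerTail rest

def loop_checker_alt (lexeme : String) : Option Bool :=
  if PySem.Str.startswith lexeme "loop" then
    loopCheckerTail (PySem.List.slice lexeme.toList (some 4) none)  -- lexeme[4:]
  else some false

-- ===== PRECONDITION & SPEC =====
-- Pre_ excludes the proper prefixes of "loop" ("", "l", "lo", "loo"): there A falls off its
-- loop with the flag unset and returns None rather than a bool, while B returns False.
def Pre_loop_checker (lexeme : String) : Prop :=
  lexeme ≠ "" ∧ lexeme ≠ "l" ∧ lexeme ≠ "lo" ∧ lexeme ≠ "loo"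
instance (lexeme : String) : Decidable (Pre_loop_checker lexeme) := by
  unfold Pre_loop_checker; infer_instance

def pvWitness_loop_checker : String := "loop"

def Spec_loop_checker (lexeme : String) (out : Option Bool) : Prop := out = loop_checker_alt lexeme
instance (lexeme : String) (out : Option Bool) : Decidable (Spec_loop_checker lexeme out) := by unfold Spec_loop_checker; infer_instance

-- ===== CLAIM (what is proved, stated in full; the proofs are below) =====
def Claim_equal_loop_checker : Prop := ∀ (lexeme : String), Dom_loop_checker lexeme → Pre_loop_checker lexeme → Spec_loop_checker lexeme (loop_checker lexeme)

-- ===== LEMMAS AND PROOFS =====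

-- after "loop" has been matched, A's state-5 loop is exactly B's tail loop
theorem tail_eq (l : List Char) : loopCheckerA l 5 true = loopCheckerTail l := by
  induction l with
  | nil => rfl
  | cons ch rest ih =>
      simp only [loopCheckerA, loopCheckerTail]
      by_cases hc : ('a' ≤ ch ∧ ch ≤ 'z') ∨ ('A' ≤ ch ∧ ch ≤ 'Z') ∨ ch = '_' ∨ ('0' ≤ ch ∧ ch ≤ '9')
      · simp [hc, isIdentChar]
      · simp [hc, isIdentChar, ih]

theorem sw_iff (s : String) :
    PySem.Str.startswith s "loop" = true ↔ ['l','o','o','p'] <+: s.toList := by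
  simp [PySem.Str.startswith_eq, PySem.Chars.startswith_iff]

theorem core_eq (lexeme : String)
    (h : lexeme ≠ "" ∧ lexeme ≠ "l" ∧ lexeme ≠ "lo" ∧ lexeme ≠ "loo") :
    loop_checker lexeme = loop_checker_alt lexeme := by
  obtain ⟨h0, h1, h2, h3⟩ := h
  have e0 : lexeme.toList ≠ ([] : List Char) := fun he => h0 (by
    have := congrArg String.ofList he; simpa using this)
  have e1 : lexeme.toList ≠ ['l'] := fun he => h1 (by
    have := congrArg String.ofList he; simpa using this)
  have e2 : lexeme.toList ≠ ['l','o'] := fun he => h2 (by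
    have := congrArg String.ofList he; simpa using this)
  have e3 : lexeme.toList ≠ ['l','o','o'] := fun he => h3 (by
    have := congrArg String.ofList he; simpa using this)
  unfold loop_checker loop_checker_alt
  by_cases hsw : PySem.Str.startswith lexeme "loop" = true
  · -- "loop" is a prefix: the list has shape l::o::o::p::rest
    obtain ⟨rest, hrest⟩ := (sw_iff lexeme).mp hsw
    rw [hsw, if_pos rfl, ← hrest]
    have hs : PySem.List.slice ('l'::'o'::'o'::'p'::rest) (some 4) none = rest := by
      simpa using PySem.List.slice_from_natCast ('l'::'o'::'o'::'p'::rest) 4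
    simp [loopCheckerA, hs, tail_eq]
  · rw [if_neg hsw]
    have hnp : ¬ ['l','o','o','p'] <+: lexeme.toList := fun hp => hsw ((sw_iff lexeme).mpr hp)
    -- A hits a mismatch before finishing "loop"
    match hl : lexeme.toList with
    | [] => exact absurd hl e0
    | a :: rest =>
      simp only [loopCheckerA]
      by_cases ha : a = 'l'
      · subst ha
        match rest with
        | [] => exact absurd hl e1
        | b :: rest =>
          simp only [loopCheckerA]
          by_cases hb : b = 'o'
          · subst hb
            match rest with
            | [] => exact absurd hl e2
            | c :: rest =>
              simp only [loopCheckerA]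
              by_cases hc : c = 'o'
              · subst hc
                match rest with
                | [] => exact absurd hl e3
                | d :: rest =>
                  simp only [loopCheckerA]
                  by_cases hd : d = 'p'
                  · subst hd
                    exact absurd (by rw [hl]; simp [List.cons_prefix_cons]) hnp
                  · simp [hd]
              · simp [hc]
          · simp [hb]
      · simp [ha]

-- ===== VERDICT (by name: the statement is the Claim_ definition above) =====
theorem loop_checker_spec : Claim_equal_loop_checker := by
  intro lexeme _ hpre
  exact core_eq lexeme hpre
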